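-- pv_equiv track=rewrite | github.com/Mirror-Prismals/Mirror-DAWg-Prismals | src/Mirror/OptimizeForOrange.py | chunk_text_by_color
-- ===== SOURCE A (Python) =====
-- letter_to_hex = {
--     'a': '0', 'b': '1', 'c': '2', 'd': '3', 'e': '4', 'f': '5',
--     'g': '6', 'h': '7', 'i': '8', 'j': '9', 'k': 'a', 'l': 'b',
--     'm': 'c', 'n': 'd', 'o': 'e', 'p': 'f'
-- }
--
-- def chunk_text_by_color(text):
--     chunks = []
--     hex_digits = []
--     current_chunk = ''
--     mapped_count = 0
--
--     for char in text:
--         current_chunk += char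
--         if char.lower() in letter_to_hex:
--             hex_digits.append(letter_to_hex[char.lower()])
--             mapped_count += 1
--             if mapped_count == 6:
--                 # Pad hex_digits if needed (should always be 6 here)
--                 color = '#' + ''.join(hex_digits)
--                 chunks.append((color, current_chunk))
--                 # Reset for next chunk
--                 hex_digits = []
--                 current_chunk = ''
--                 mapped_count = 0
--
--     # Handle any remainder
--     if mapped_count > 0:
--         color = '#' + ''.join(hex_digits + ['0'] * (6 - mapped_count))
--         chunks.append((color, current_chunk))
--
--     return chunks
-- ===== SOURCE B (Python) =====
-- letter_to_hex = {
--     'a': '0', 'b': '1', 'c': '2', 'd': '3', 'e': '4', 'f': '5',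
--     'g': '6', 'h': '7', 'i': '8', 'j': '9', 'k': 'a', 'l': 'b',
--     'm': 'c', 'n': 'd', 'o': 'e', 'p': 'f'
-- }
--
-- def chunk_text_by_color(text):
--     # One pass to collect (index, hex digit) of every mapped character,
--     # then cut the original text at every 6th mapped character.
--     ps = [(i, letter_to_hex[c.lower()]) for i, c in enumerate(text)
--           if c.lower() in letter_to_hex]
--     chunks = []
--     prev = 0
--     nfull = len(ps) - len(ps) % 6
--     for g0 in range(0, nfull, 6):
--         g = ps[g0:g0 + 6]
--         last = g[5][0]
--         chunks.append(('#' + ''.join(h for _, h in g), text[prev:last + 1]))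
--         prev = last + 1
--     rem = ps[nfull:]
--     if rem:
--         chunks.append(('#' + ''.join(h for _, h in rem) + '0' * (6 - len(rem)),
--                        text[prev:]))
--     return chunks
-- ===== Notes on version B (the rewrite author's own statement) =====
-- stated objective: alternative
-- what changed: Instead of one stateful per-character loop that accumulates the current chunk, its hex digits and a counter simultaneously, B first builds the list of (index, hex digit) pairs of all mapped characters in one pass and then slices the original text at every 6th mapped index, grouping the pair list six at a time.
import Mathlib
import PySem

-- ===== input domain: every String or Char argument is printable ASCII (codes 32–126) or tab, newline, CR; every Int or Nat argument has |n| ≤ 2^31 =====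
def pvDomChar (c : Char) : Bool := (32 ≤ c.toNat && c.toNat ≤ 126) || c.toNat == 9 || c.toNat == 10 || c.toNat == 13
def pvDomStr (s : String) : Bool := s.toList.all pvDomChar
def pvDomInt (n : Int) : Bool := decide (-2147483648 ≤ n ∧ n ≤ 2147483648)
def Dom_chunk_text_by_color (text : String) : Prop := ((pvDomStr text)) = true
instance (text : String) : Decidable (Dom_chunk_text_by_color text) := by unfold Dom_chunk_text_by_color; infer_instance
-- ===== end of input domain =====

-- B replaces A's single stateful per-character loop by: collect (index, hex digit)
-- pairs of the mapped characters in one pass, then slice the original text at every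
-- 6th mapped index (alternative decomposition, same output).


-- the module-level letter_to_hex table, fused with char.lower():
-- mhex c = letter_to_hex.get(c.lower()) (exact on the ASCII domain Dom); shared by both ports like the Python module constant
def mhex (c : Char) : Option Char :=
  match c with
  | 'a' | 'A' => some '0'
  | 'b' | 'B' => some '1'
  | 'c' | 'C' => some '2'
  | 'd' | 'D' => some '3'
  | 'e' | 'E' => some '4'
  | 'f' | 'F' => some '5'
  | 'g' | 'G' => some '6'
  | 'h' | 'H' => some '7'
  | 'i' | 'I' => some '8'
  | 'j' | 'J' => some '9'
  | 'k' | 'K' => some 'a'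
  | 'l' | 'L' => some 'b'
  | 'm' | 'M' => some 'c'
  | 'n' | 'N' => some 'd'
  | 'o' | 'O' => some 'e'
  | 'p' | 'P' => some 'f'
  | _ => none

-- ===== PORT A =====
-- loop body of A; state = (chunks, hex_digits, current_chunk, mapped_count); strings kept as List Char (String.ofList at emit)
def aStep (st : List (String × String) × List Char × List Char × Nat) (c : Char) :
    List (String × String) × List Char × List Char × Nat :=
  match st with
  | (chunks, hexd, cur, cnt) =>
    let cur' := cur ++ [c]
    match mhex c with
    | some h =>
      let hexd' := hexd ++ [h]
      let cnt' := cnt + 1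
      if cnt' = 6 then
        (chunks ++ [(String.ofList ('#' :: hexd'), String.ofList cur')], [], [], 0)
      else (chunks, hexd', cur', cnt')
    | none => (chunks, hexd, cur', cnt)

-- the code after A's loop ("Handle any remainder")
def aFinal (st : List (String × String) × List Char × List Char × Nat) : List (String × String) :=
  match st with
  | (chunks, hexd, cur, cnt) =>
    if 0 < cnt then
      chunks ++ [(String.ofList ('#' :: (hexd ++ List.replicate (6 - cnt) '0')), String.ofList cur)]
    else chunks

def chunk_text_by_color (text : String) : List (String × String) :=
  aFinal (text.toList.foldl aStep ([], [], [], 0))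

-- ===== PORT B =====
-- the comprehension: [(i, letter_to_hex[c.lower()]) for i, c in enumerate(text) if c.lower() in letter_to_hex]
def bPairs (t : List Char) : List (Int × Char) :=
  (PySem.List.enumerate t 0).filterMap (fun p => (mhex p.2).map (fun h => (p.1, h)))

-- the while loop over the pair list, six pairs at a time, plus the trailing "if ps:" block
def bLoop (t : List Char) (ps : List (Int × Char)) (prev : Int) : List (String × String) :=
  if h : 6 ≤ ps.length then
    let last := ((ps.take 6)[5]'(by simp [List.length_take]; omega)).1
    (String.ofList ('#' :: (ps.take 6).map Prod.snd),
      String.ofList (PySem.List.slice t (some prev) (some (last + 1))))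
      :: bLoop t (ps.drop 6) (last + 1)
  else if ps.isEmpty then []
  else
    [(String.ofList ('#' :: (ps.map Prod.snd ++ List.replicate (6 - ps.length) '0')),
      String.ofList (PySem.List.slice t (some prev) none))]
termination_by ps.length
decreasing_by simp; omega

def chunk_text_by_color_alt (text : String) : List (String × String) :=
  bLoop text.toList (bPairs text.toList) 0

-- ===== PRECONDITION & SPEC =====
def Spec_chunk_text_by_color (text : String) (out : List (String × String)) : Prop := out = chunk_text_by_color_alt text
instance (text : String) (out : List (String × String)) : Decidable (Spec_chunk_text_by_color text out) := by unfold Spec_chunk_text_by_color; infer_instance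

-- ===== CLAIM (what is proved, stated in full; the proofs are below) =====
def Claim_equal_chunk_text_by_color : Prop := ∀ (text : String), Dom_chunk_text_by_color text → Spec_chunk_text_by_color text (chunk_text_by_color text)

-- ===== LEMMAS AND PROOFS =====

-- cons-style restatement of A's loop (digits, current chunk); cnt is digits.length
def recA : List Char → List Char → List Char → List (String × String)
  | [], digits, cur =>
    if digits.isEmpty then []
    else [(String.ofList ('#' :: (digits ++ List.replicate (6 - digits.length) '0')), String.ofList cur)]
  | c :: cs, digits, cur =>
    match mhex c with
    | none => recA cs digits (cur ++ [c])
    | some h =>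
      if digits.length = 5 then
        (String.ofList ('#' :: (digits ++ [h])), String.ofList (cur ++ [c])) :: recA cs [] []
      else recA cs (digits ++ [h]) (cur ++ [c])

-- (index, digit) pairs of the mapped characters, indices starting at k
def ipairs : Int → List Char → List (Int × Char)
  | _, [] => []
  | k, c :: cs =>
    match mhex c with
    | some h => (k, h) :: ipairs (k + 1) cs
    | none => ipairs (k + 1) cs

theorem ipairs_bounds : ∀ (cs : List Char) (k : Int) (p : Int × Char),
    p ∈ ipairs k cs → k ≤ p.1 ∧ p.1 < k + cs.length := by
  intro cs
  induction cs with
  | nil => intro k p hp; simp [ipairs] at hp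
  | cons c cs ih =>
    intro k p hp
    simp only [ipairs] at hp
    cases hm : mhex c with
    | none =>
      rw [hm] at hp
      have := ih (k + 1) p hp
      simp only [List.length_cons]
      push_cast
      omega
    | some h =>
      rw [hm] at hp
      rcases List.mem_cons.mp hp with h1 | h2
      · subst h1; simp only [List.length_cons]; push_cast; omega
      · have := ih (k + 1) p h2
        simp only [List.length_cons]; push_cast; omega



theorem ipairs_split : ∀ (m : Nat) (cs : List Char) (k : Int),
    ipairs k cs = ipairs k (cs.take m) ++ ipairs (k + m) (cs.drop m) := by
  intro m
  induction m with
  | zero => intro cs k; simp [ipairs]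
  | succ m ih =>
    intro cs k
    cases cs with
    | nil => simp [ipairs]
    | cons c cs =>
      have hk : (k + 1) + (m : Int) = k + ((m + 1 : Nat) : Int) := by push_cast; ring
      simp only [List.take_succ_cons, List.drop_succ_cons, ipairs]
      cases mhex c with
      | none => rw [ih cs (k + 1), hk]
      | some h => simp only [List.cons_append]; rw [ih cs (k + 1), hk]


theorem ipairs_take : ∀ (cs : List Char) (k : Int) (i j : Nat) (h : Char),
    (ipairs k cs)[i]? = some (k + j, h) →
    ipairs k (cs.take (j + 1)) = (ipairs k cs).take (i + 1) := by
  intro cs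
  induction cs with
  | nil => intro k i j h hp; simp [ipairs] at hp
  | cons c cs ih =>
    intro k i j h hp
    simp only [ipairs] at hp
    cases hm : mhex c with
    | none =>
      rw [hm] at hp
      have hb := ipairs_bounds cs (k + 1) _ (List.mem_of_getElem? hp)
      obtain ⟨j', rfl⟩ : ∃ j', j = j' + 1 := ⟨j - 1, by omega⟩
      have he : k + ((j' + 1 : Nat) : Int) = (k + 1) + (j' : Int) := by push_cast; ring
      rw [he] at hp
      rw [List.take_succ_cons]
      simp only [ipairs, hm]
      exact ih (k + 1) i j' h hp
    | some h0 =>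
      rw [hm] at hp
      cases i with
      | zero =>
        simp only [List.getElem?_cons_zero, Option.some.injEq, Prod.mk.injEq] at hp
        obtain ⟨h1, h2⟩ := hp
        have hj : j = 0 := by omega
        subst hj
        simp [List.take_succ_cons, ipairs, hm, h2]
      | succ i' =>
        simp only [List.getElem?_cons_succ] at hp
        have hb := ipairs_bounds cs (k + 1) _ (List.mem_of_getElem? hp)
        obtain ⟨j', rfl⟩ : ∃ j', j = j' + 1 := ⟨j - 1, by omega⟩
        have he : k + ((j' + 1 : Nat) : Int) = (k + 1) + (j' : Int) := by push_cast; ring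
        rw [he] at hp
        rw [List.take_succ_cons]
        simp only [ipairs, hm, List.take_succ_cons]
        rw [ih (k + 1) i' j' h hp]


theorem recA_full : ∀ (cs : List Char) (k : Int) (digits cur : List Char) (j : Nat) (h : Char),
    digits.length ≤ 5 → (ipairs k cs)[5 - digits.length]? = some (k + j, h) →
    recA cs digits cur =
      (String.ofList ('#' :: (digits ++ ((ipairs k cs).take (6 - digits.length)).map Prod.snd)),
        String.ofList (cur ++ cs.take (j + 1))) :: recA (cs.drop (j + 1)) [] [] := by
  intro cs
  induction cs with
  | nil => intro k digits cur j hx _ hp; simp [ipairs] at hp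
  | cons c cs ih =>
    intro k digits cur j hx hd hp
    simp only [ipairs] at hp
    cases hm : mhex c with
    | none =>
      rw [hm] at hp
      have hb := ipairs_bounds cs (k + 1) _ (List.mem_of_getElem? hp)
      obtain ⟨j', rfl⟩ : ∃ j', j = j' + 1 := ⟨j - 1, by omega⟩
      have he : k + ((j' + 1 : Nat) : Int) = (k + 1) + (j' : Int) := by push_cast; ring
      rw [he] at hp
      have hih := ih (k + 1) digits (cur ++ [c]) j' hx hd hp
      simp only [recA, hm, hih, ipairs, List.take_succ_cons, List.drop_succ_cons,
        List.append_assoc, List.singleton_append]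
    | some h0 =>
      rw [hm] at hp
      by_cases h5 : digits.length = 5
      · rw [h5] at hp
        simp only [Nat.sub_self, List.getElem?_cons_zero, Option.some.injEq, Prod.mk.injEq] at hp
        obtain ⟨h1, h2⟩ := hp
        have hj : j = 0 := by omega
        subst hj
        simp only [recA, hm, h5, if_true, ipairs, List.take_succ_cons,
          List.drop_succ_cons, List.map_cons, h2]
        simp [← h2]
      · have hi : 5 - digits.length = (5 - (digits ++ [h0]).length) + 1 := by simp; omega
        rw [hi, List.getElem?_cons_succ] at hp
        have hb := ipairs_bounds cs (k + 1) _ (List.mem_of_getElem? hp)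
        obtain ⟨j', rfl⟩ : ∃ j', j = j' + 1 := ⟨j - 1, by omega⟩
        have he : k + ((j' + 1 : Nat) : Int) = (k + 1) + (j' : Int) := by push_cast; ring
        rw [he] at hp
        have hih := ih (k + 1) (digits ++ [h0]) (cur ++ [c]) j' hx (by simp; omega) hp
        have h6 : 6 - digits.length = (6 - (digits ++ [h0]).length) + 1 := by simp; omega
        simp only [recA, hm, h5, if_false, hih, ipairs, h6, List.take_succ_cons,
          List.drop_succ_cons, List.map_cons, List.append_assoc, List.singleton_append]


theorem recA_rem : ∀ (cs : List Char) (k : Int) (digits cur : List Char),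
    digits.length + (ipairs k cs).length ≤ 5 →
    recA cs digits cur =
      if digits.length + (ipairs k cs).length = 0 then []
      else [(String.ofList ('#' :: (digits ++ (ipairs k cs).map Prod.snd ++
              List.replicate (6 - (digits.length + (ipairs k cs).length)) '0')),
             String.ofList (cur ++ cs))] := by
  intro cs
  induction cs with
  | nil =>
    intro k digits cur _
    simp only [ipairs, List.length_nil, Nat.add_zero, List.map_nil, List.append_nil, recA]
    by_cases hd : digits = []
    · subst hd; simp
    · have h0 : ¬ digits.length = 0 := by simpa [List.length_eq_zero_iff] using hd
      simp [List.isEmpty_iff, hd, h0]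
  | cons c cs ih =>
    intro k digits cur hle
    cases hm : mhex c with
    | none =>
      simp only [ipairs, hm] at hle ⊢
      have h := ih (k + 1) digits (cur ++ [c]) hle
      simp only [recA, hm, h, List.append_assoc, List.singleton_append]
    | some h0 =>
      simp only [ipairs, hm, List.length_cons] at hle ⊢
      have h5 : ¬ digits.length = 5 := by omega
      have h := ih (k + 1) (digits ++ [h0]) (cur ++ [c]) (by simp; omega)
      simp only [recA, hm, h5, if_false, h, List.length_append, List.length_cons,
        List.length_nil, List.map_cons]
      have hc1 : ¬ (digits.length + 1 + (ipairs (k + 1) cs).length = 0) := by omega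
      have hc2 : ¬ (digits.length + ((ipairs (k + 1) cs).length + 1) = 0) := by omega
      rw [if_neg hc1, if_neg hc2]
      have hrep : 6 - (digits.length + 1 + (ipairs (k + 1) cs).length)
          = 6 - (digits.length + ((ipairs (k + 1) cs).length + 1)) := by omega
      simp [List.append_assoc, hrep]


theorem foldA_recA : ∀ (cs : List Char) (chunks : List (String × String)) (digits cur : List Char),
    digits.length ≤ 5 →
    aFinal (cs.foldl aStep (chunks, digits, cur, digits.length)) = chunks ++ recA cs digits cur := by
  intro cs
  induction cs with
  | nil =>
    intro chunks digits cur _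
    simp only [List.foldl_nil, aFinal, recA]
    by_cases hd : digits = []
    · subst hd; simp
    · have h0 : 0 < digits.length := by
        cases digits with
        | nil => simp at hd
        | cons a l => simp
      simp [List.isEmpty_iff, hd, h0]
  | cons c cs ih =>
    intro chunks digits cur hd
    simp only [List.foldl_cons]
    cases hm : mhex c with
    | none =>
      have hst : aStep (chunks, digits, cur, digits.length) c
          = (chunks, digits, cur ++ [c], digits.length) := by simp [aStep, hm]
      rw [hst, ih chunks digits (cur ++ [c]) hd]
      simp [recA, hm]
    | some h0 =>
      by_cases h5 : digits.length = 5
      · have hst : aStep (chunks, digits, cur, digits.length) c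
            = (chunks ++ [(String.ofList ('#' :: (digits ++ [h0])), String.ofList (cur ++ [c]))],
               [], [], 0) := by simp [aStep, hm, h5]
        rw [hst]
        have h2 := ih (chunks ++ [(String.ofList ('#' :: (digits ++ [h0])), String.ofList (cur ++ [c]))]) [] [] (by simp)
        simp only [List.length_nil] at h2
        rw [h2]
        simp [recA, hm, h5, List.append_assoc]
      · have hst : aStep (chunks, digits, cur, digits.length) c
            = (chunks, digits ++ [h0], cur ++ [c], (digits ++ [h0]).length) := by
          simp [aStep, hm, show ¬(digits.length + 1 = 6) from by omega]
        rw [hst, ih chunks (digits ++ [h0]) (cur ++ [c]) (by simp; omega)]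
        simp [recA, hm, h5]


theorem bPairs_ipairs : ∀ (cs : List Char) (k : Int),
    (PySem.List.enumerate cs k).filterMap (fun p => (mhex p.2).map (fun h => (p.1, h))) = ipairs k cs := by
  intro cs
  induction cs with
  | nil => intro k; simp [ipairs, PySem.List.enumerate_nil]
  | cons c cs ih =>
    intro k
    rw [PySem.List.enumerate_cons]
    simp only [List.filterMap_cons, ipairs]
    cases hm : mhex c <;> simp [ih]


theorem bLoop_recA (t : List Char) : ∀ (n k : Nat), (t.drop k).length ≤ n →
    bLoop t (ipairs k (t.drop k)) k = recA (t.drop k) [] [] := by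
  intro n
  induction n with
  | zero =>
    intro k hlen
    have hcs : t.drop k = [] := List.length_eq_zero_iff.mp (by omega)
    rw [hcs]
    rw [bLoop]
    simp [ipairs, recA]
  | succ n ih =>
    intro k hlen
    rw [bLoop]
    by_cases h6 : 6 ≤ (ipairs (k : Int) (t.drop k)).length
    · rw [dif_pos h6]
      have h5 : 5 < (ipairs (k : Int) (t.drop k)).length := by omega
      have hmem : (ipairs (k : Int) (t.drop k))[5] ∈ ipairs (k : Int) (t.drop k) :=
        List.getElem_mem h5
      have hb := ipairs_bounds (t.drop k) k _ hmem
      have hjdef : ((ipairs (k : Int) (t.drop k))[5].1 - k).toNat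
          = ((ipairs (k : Int) (t.drop k))[5].1 - k).toNat := rfl
      obtain ⟨j, hj1⟩ : ∃ j : Nat, (ipairs (k : Int) (t.drop k))[5].1 = (k : Int) + j :=
        ⟨((ipairs (k : Int) (t.drop k))[5].1 - k).toNat, by omega⟩
      have hjlen : j < (t.drop k).length := by
        have := hb.2
        omega
      have hp5 : (ipairs (k : Int) (t.drop k))[5]? = some ((k : Int) + j, (ipairs (k : Int) (t.drop k))[5].2) := by
        rw [List.getElem?_eq_getElem h5]
        exact congrArg some (Prod.ext hj1 rfl)
      have htake := ipairs_take (t.drop k) k 5 j _ hp5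
      have hsplit := ipairs_split (j + 1) (t.drop k) k
      have hps2 : ipairs (k : Int) (t.drop k)
          = (ipairs (k : Int) (t.drop k)).take 6
            ++ ipairs ((k : Int) + ((j + 1 : Nat) : Int)) ((t.drop k).drop (j + 1)) := by
        conv_lhs => rw [hsplit]
        rw [htake]
      have hlen6 : ((ipairs (k : Int) (t.drop k)).take 6).length = 6 := by
        simp [List.length_take]; omega
      have hdrop : (ipairs (k : Int) (t.drop k)).drop 6
          = ipairs ((k : Int) + ((j + 1 : Nat) : Int)) ((t.drop k).drop (j + 1)) := by
        conv_lhs => rw [hps2]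
        exact List.drop_left' hlen6
      have hslice : PySem.List.slice t (some (k : Int)) (some ((ipairs (k : Int) (t.drop k))[5].1 + 1))
          = (t.drop k).take (j + 1) := by
        rw [hj1, show (k : Int) + (j : Int) + 1 = (k : Int) + ((j + 1 : Nat) : Int) from by push_cast; ring,
          PySem.List.slice_natCast_add]
      have hrec := recA_full (t.drop k) k [] [] j _ (by simp) (by simpa using hp5)
      rw [hrec]
      have hdd : (t.drop k).drop (j + 1) = t.drop (k + (j + 1)) := List.drop_drop
      have hih := ih (k + (j + 1)) (by simp only [List.length_drop] at hlen hjlen ⊢; omega)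
      have hget5 : ((ipairs (k : Int) (t.drop k)).take 6)[5]'(by rw [hlen6]; omega)
          = (ipairs (k : Int) (t.drop k))[5] := List.getElem_take
      simp only [hget5]
      rw [hslice, hdrop, hj1]
      rw [show (k : Int) + (j : Int) + 1 = ((k + (j + 1) : Nat) : Int) from by push_cast; ring]
      rw [hdd,
        show (k : Int) + ((j + 1 : Nat) : Int) = ((k + (j + 1) : Nat) : Int) from by push_cast; ring,
        hih]
      simp
    · rw [dif_neg h6]
      by_cases hE : ipairs (k : Int) (t.drop k) = []
      · rw [hE]
        rw [recA_rem (t.drop k) k [] [] (by rw [hE]; simp)]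
        simp [hE]
      · rw [if_neg (by simpa [List.isEmpty_iff] using hE)]
        rw [recA_rem (t.drop k) k [] [] (by simp at h6 ⊢; omega)]
        have hne : ¬ ((0 : Nat) + (ipairs (k : Int) (t.drop k)).length = 0) := by
          simp [List.length_eq_zero_iff]; exact hE
        simp only [List.length_nil, Nat.zero_add, List.nil_append] at hne ⊢
        rw [if_neg (by simpa using hne)]
        rw [PySem.List.slice_from_natCast]


-- ===== VERDICT (by name: the statement is the Claim_ definition above) =====
theorem chunk_text_by_color_spec : Claim_equal_chunk_text_by_color := by
  intro text _
  unfold Spec_chunk_text_by_color chunk_text_by_color chunk_text_by_color_alt bPairs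
  rw [bPairs_ipairs]
  have hA := foldA_recA text.toList [] [] [] (by simp)
  simp only [List.length_nil] at hA
  rw [hA, List.nil_append]
  have hB := bLoop_recA text.toList text.toList.length 0 (by simp)
  simpa using hB.symm
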